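-- pv_equiv track=rewrite | github.com/mlcommons/inference_results_v1.0 | closed/Neuchips/code/dlrm-99/Server/python/utils_neuchips_lut.py | idx_remap
-- ===== SOURCE A (Python) =====
-- def idx_remap(dim):
--
--     '''
--     -> low triangle
--
--     ex: 5x5 array
--     -  -  -  -  -
--     0  -  -  -  -
--     1  2  -  -  -
--     3  4  5  -  -
--     6  7  8  9  -
--     '''
--     idx = 0
--     p = []
--     for y in range(dim):
--         for x in range(y):
--             p.append([y, x, idx])
--             idx += 1
--
--     '''
--     -> sorted by x, then by y
--
--     -  -  -  -  -
--     0  -  -  -  -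
--     1  4  -  -  -
--     2  5  7  -  -
--     3  6  8  9  -
--     '''
--     p = sorted(p, key=lambda s: (s[1] << 16) + s[0])
--
--     '''
--     -> merge {n, dim-n}
--
--     -  -  -  -  -
--     0  -  -  -  -
--     1  5  -  -  -
--     2  6  8  -  -
--     3  7  9  4  -
--
--     0  2  3  1  <-- order
--     '''
--
--     idx = []
--     dim = dim - 1
--     dim_div2 = (dim >> 1)
--     for i in range(dim_div2):
--         for j in range(len(p)):
--             if p[j][1] == i:  # x = i
--                 idx.append(p[j][2])
--             elif p[j][1] == dim-i-1:  # x = dim-i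
--                 idx.append(p[j][2])
--
--     return idx
-- ===== SOURCE B (Python) =====
-- def idx_remap(dim):
--     # Closed-form triangle indices plus a single bucket-scatter merge pass
--     # in place of A's running counter and per-pair rescan of all entries.
--     p = [(y, x, y * (y - 1) // 2 + x) for y in range(dim) for x in range(y)]
--     p.sort(key=lambda s: (s[1] << 16) + s[0])
--     d = dim - 1
--     half = d >> 1
--     buckets = [[] for _ in range(half)]
--     for y, x, i in p:
--         pid = min(x, d - 1 - x)
--         if 0 <= pid < half:
--             buckets[pid].append(i)
--     out = []
--     for b in buckets:
--         out.extend(b)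
--     return out
-- ===== Notes on version B (the rewrite author's own statement) =====
-- stated objective: faster
-- what changed: The triangle is built by a comprehension with a closed-form triangular-number index instead of a running counter, and the pair-merge phase, which rescanned the whole sorted entry list once per pair index (cubic in dim), is replaced by a single scatter pass dropping each entry into its mirrored-pair bucket and then concatenating the buckets in order.
import Mathlib
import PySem

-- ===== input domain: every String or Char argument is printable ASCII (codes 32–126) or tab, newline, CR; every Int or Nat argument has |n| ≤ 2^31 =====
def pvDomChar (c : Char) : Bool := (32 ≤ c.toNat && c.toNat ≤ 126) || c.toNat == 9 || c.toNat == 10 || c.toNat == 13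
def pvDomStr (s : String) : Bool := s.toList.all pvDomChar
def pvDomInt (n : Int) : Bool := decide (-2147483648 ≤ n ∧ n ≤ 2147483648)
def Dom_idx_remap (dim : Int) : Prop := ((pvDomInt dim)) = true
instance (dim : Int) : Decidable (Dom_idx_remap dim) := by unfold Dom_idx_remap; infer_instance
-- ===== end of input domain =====

-- B replaces A's running-counter triangle build by the closed form y*(y-1)//2 + x and A's
-- per-pair rescan of all entries (O(dim^3)) by one bucket-scatter pass; objective: faster.


-- ===== PORT A =====
def idx_remap (dim : Int) : List Int :=
  -- idx = 0; p = []; for y in range(dim): for x in range(y): p.append([y,x,idx]); idx += 1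
  let st := (PySem.List.pyRange 0 dim 1).foldl
      (fun s y => (PySem.List.pyRange 0 y 1).foldl
        (fun t x => (t.1 + 1, t.2 ++ [(y, x, t.1)])) s)
      ((0 : Int), ([] : List (Int × Int × Int)))
  -- p = sorted(p, key=lambda s: (s[1] << 16) + s[0])
  let p := PySem.List.sorted st.2 (fun s => (s.2.1 <<< (16 : Nat)) + s.1) false
  -- dim = dim - 1; dim_div2 = dim >> 1
  let d1 := dim - 1
  let dim_div2 := d1 >>> (1 : Nat)
  -- for i in range(dim_div2): for j in range(len(p)): if p[j][1]==i: … elif p[j][1]==dim-i-1: …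
  (PySem.List.pyRange 0 dim_div2 1).foldl (fun acc i =>
    (PySem.List.pyRange 0 (p.length : Int) 1).foldl (fun acc j =>
      let e := PySem.List.pyGetD p j (0, 0, 0)
      if e.2.1 == i then acc ++ [e.2.2]
      else if e.2.1 == d1 - i - 1 then acc ++ [e.2.2]
      else acc) acc) []

-- ===== PORT B =====
def idx_remap_alt (dim : Int) : List Int :=
  -- p = sorted(((y, x, y*(y-1)//2 + x) for y in range(dim) for x in range(y)), key=…)
  let p := PySem.List.sorted
      ((PySem.List.pyRange 0 dim 1).flatMap (fun y =>
        (PySem.List.pyRange 0 y 1).map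
          (fun x => (y, x, PySem.Int.floordiv (y * (y - 1)) 2 + x))))
      (fun s => (s.2.1 <<< (16 : Nat)) + s.1) false
  let d := dim - 1
  let half := d >>> (1 : Nat)
  -- buckets = [[] for _ in range(half)]
  let buckets0 := (PySem.List.pyRange 0 half 1).map (fun _ => ([] : List Int))
  -- for y,x,i in p: pid = min(x, d-1-x); if 0 <= pid < half: buckets[pid].append(i)
  let buckets := p.foldl (fun bs e =>
      let pid := min e.2.1 (d - 1 - e.2.1)
      if 0 ≤ pid ∧ pid < half then
        PySem.List.pySetD bs pid (PySem.List.pyGetD bs pid [] ++ [e.2.2])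
      else bs) buckets0
  -- out = []; for b in buckets: out.extend(b)
  buckets.foldl (fun acc b => acc ++ b) []

-- ===== PRECONDITION & SPEC =====
def Spec_idx_remap (dim : Int) (out : List Int) : Prop := out = idx_remap_alt dim
instance (dim : Int) (out : List Int) : Decidable (Spec_idx_remap dim out) := by unfold Spec_idx_remap; infer_instance

-- ===== CLAIM (what is proved, stated in full; the proofs are below) =====
def Claim_equal_idx_remap : Prop := ∀ (dim : Int), Dom_idx_remap dim → Spec_idx_remap dim (idx_remap dim)

-- ===== LEMMAS AND PROOFS =====

-- floordiv by 2 of an explicitly even number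
theorem pvFd2 (a q : Int) (h : a = 2 * q) : PySem.Int.floordiv a 2 = q := by
  rw [(PySem.Int.floordiv_eq_iff_of_pos (by omega) : PySem.Int.floordiv a 2 = q ↔ _)]
  omega

-- triangular-number step: T(n) + n = T(n+1) with T(n) = n*(n-1)//2
theorem pvTri_step (n : Int) :
    PySem.Int.floordiv (n * (n - 1)) 2 + n = PySem.Int.floordiv ((n + 1) * n) 2 := by
  obtain ⟨q, hq⟩ := Int.even_mul_succ_self (n - 1)
  have h1 : n * (n - 1) = 2 * q := by linear_combination hq
  have h2 : (n + 1) * n = 2 * (q + n) := by linear_combination hq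
  rw [pvFd2 _ q h1, pvFd2 _ (q + n) h2]

-- A's inner row loop: counter advances by the row length, entries get idx = c + x
theorem pvRow (n : Nat) (y c : Int) (acc : List (Int × Int × Int)) :
    (PySem.List.pyRange 0 (n : Int) 1).foldl
        (fun t x => (t.1 + 1, t.2 ++ [(y, x, t.1)])) (c, acc)
      = (c + n, acc ++ (PySem.List.pyRange 0 (n : Int) 1).map (fun x => (y, x, c + x))) := by
  induction n with
  | zero => simp
  | succ m ih =>
      have hc : ((m + 1 : Nat) : Int) = (m : Int) + 1 := by push_cast; ring
      rw [hc, PySem.List.pyRange_one_succ_right (by positivity), List.foldl_append, ih]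
      simp
      omega

-- A's triangle build equals B's closed-form comprehension (and the counter is T(n))
theorem pvBuild (n : Nat) :
    (PySem.List.pyRange 0 (n : Int) 1).foldl
        (fun s y => (PySem.List.pyRange 0 y 1).foldl
          (fun t x => (t.1 + 1, t.2 ++ [(y, x, t.1)])) s)
        ((0 : Int), ([] : List (Int × Int × Int)))
      = (PySem.Int.floordiv ((n : Int) * ((n : Int) - 1)) 2,
         (PySem.List.pyRange 0 (n : Int) 1).flatMap (fun y =>
           (PySem.List.pyRange 0 y 1).map
             (fun x => (y, x, PySem.Int.floordiv (y * (y - 1)) 2 + x)))) := by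
  induction n with
  | zero => simp
  | succ m ih =>
      have hc : ((m + 1 : Nat) : Int) = (m : Int) + 1 := by push_cast; ring
      rw [hc, PySem.List.pyRange_one_succ_right (by positivity), List.foldl_append,
          List.flatMap_append, ih]
      simp only [List.foldl_cons, List.foldl_nil]
      rw [show (PySem.List.pyRange 0 (m : Int) 1).foldl
            (fun t x => (t.1 + 1, t.2 ++ [((m : Int), x, t.1)]))
            (PySem.Int.floordiv ((m : Int) * ((m : Int) - 1)) 2,
             (PySem.List.pyRange 0 (m : Int) 1).flatMap (fun y =>
               (PySem.List.pyRange 0 y 1).map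
                 (fun x => (y, x, PySem.Int.floordiv (y * (y - 1)) 2 + x))))
          = _ from pvRow m (m : Int) _ _]
      rw [pvTri_step]
      simp

-- the two ports build the SAME list p (before sorting)
theorem pvTri_eq (dim : Int) :
    ((PySem.List.pyRange 0 dim 1).foldl
        (fun s y => (PySem.List.pyRange 0 y 1).foldl
          (fun t x => (t.1 + 1, t.2 ++ [(y, x, t.1)])) s)
        ((0 : Int), ([] : List (Int × Int × Int)))).2
      = (PySem.List.pyRange 0 dim 1).flatMap (fun y =>
          (PySem.List.pyRange 0 y 1).map
            (fun x => (y, x, PySem.Int.floordiv (y * (y - 1)) 2 + x))) := by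
  by_cases h : 0 ≤ dim
  case pos =>
    obtain ⟨n, rfl⟩ := Int.eq_ofNat_of_zero_le h
    rw [pvBuild n]
  case neg => rw [PySem.List.pyRange_one_eq_nil (by omega)]; rfl

-- pair index of an entry (y, x, i): column x merges into bucket min(x, d-1-x)
def pvPid (d1 : Int) (e : Int × Int × Int) : Int := min e.2.1 (d1 - 1 - e.2.1)

-- which entries land in bucket j
def pvPred (d1 half : Int) (j : Nat) (e : Int × Int × Int) : Bool :=
  decide ((0 ≤ pvPid d1 e ∧ pvPid d1 e < half) ∧ pvPid d1 e = (j : Int))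

-- B's scatter loop, named for the proofs (definitionally the foldl in idx_remap_alt)
def pvScatter (d1 half : Int) (es : List (Int × Int × Int)) (bs : List (List Int)) :
    List (List Int) :=
  es.foldl (fun bs e =>
      let pid := min e.2.1 (d1 - 1 - e.2.1)
      if 0 ≤ pid ∧ pid < half then
        PySem.List.pySetD bs pid (PySem.List.pyGetD bs pid [] ++ [e.2.2])
      else bs) bs

theorem pvScatter_length (d1 half : Int) (es : List (Int × Int × Int)) :
    ∀ bs : List (List Int), (pvScatter d1 half es bs).length = bs.length := by
  induction es with
  | nil => intro bs; rfl
  | cons e es ih =>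
      intro bs
      show (pvScatter d1 half es _).length = _
      rw [ih]
      dsimp only
      generalize min e.2.1 (d1 - 1 - e.2.1) = pid
      split
      · simp [PySem.List.length_pySetD]
      · rfl

theorem pvScatter_cons (d1 half : Int) (e : Int × Int × Int) (es : List (Int × Int × Int))
    (bs : List (List Int)) :
    pvScatter d1 half (e :: es) bs
      = pvScatter d1 half es
          (if 0 ≤ pvPid d1 e ∧ pvPid d1 e < half then
            PySem.List.pySetD bs (pvPid d1 e)
              (PySem.List.pyGetD bs (pvPid d1 e) [] ++ [e.2.2])
          else bs) := rfl

theorem pvScatter_getD (d1 half : Int) (es : List (Int × Int × Int)) :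
    ∀ (bs : List (List Int)) (j : Nat), j < bs.length →
      (pvScatter d1 half es bs).getD j []
        = bs.getD j [] ++ (es.filter (pvPred d1 half j)).map (fun e => e.2.2) := by
  induction es with
  | nil => intro bs j hj; simp [pvScatter]
  | cons e es ih =>
      intro bs j hj
      rw [pvScatter_cons]
      by_cases hg : 0 ≤ pvPid d1 e ∧ pvPid d1 e < half
      · rw [if_pos hg]
        have hlen : (PySem.List.pySetD bs (pvPid d1 e)
            (PySem.List.pyGetD bs (pvPid d1 e) [] ++ [e.2.2])).length = bs.length :=
          PySem.List.length_pySetD ..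
        rw [ih _ j (by rw [hlen]; exact hj)]
        rw [PySem.List.pySetD_of_nonneg bs _ hg.1]
        by_cases hjj : pvPid d1 e = (j : Int)
        · have ht : (pvPid d1 e).toNat = j := by omega
          have hpj : pvPred d1 half j e = true := by
            simp only [pvPred, decide_eq_true_eq]; exact ⟨hg, hjj⟩
          rw [List.filter_cons_of_pos hpj]
          have hget : PySem.List.pyGetD bs (pvPid d1 e) [] = bs.getD j [] := by
            rw [PySem.List.pyGetD_eq_getElem bs [] hg.1 (by omega)]
            rw [List.getD_eq_getElem bs [] (by omega)]
            simp [ht]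
          rw [List.getD_eq_getElem _ [] (by rw [List.length_set]; exact hj),
              List.getElem_set, hget]
          simp [ht]
        · have hpj : pvPred d1 half j e = false := by
            simp only [pvPred, decide_eq_false_iff_not]
            intro h; exact hjj h.2
          rw [List.filter_cons_of_neg (by simp [hpj])]
          have ht : (pvPid d1 e).toNat ≠ j := by omega
          rw [List.getD_eq_getElem _ [] (by rw [List.length_set]; exact hj),
              List.getElem_set, List.getD_eq_getElem bs [] hj]
          simp [ht]
      · rw [if_neg hg]
        rw [ih _ j hj]
        have hpj : pvPred d1 half j e = false := by
          simp only [pvPred, decide_eq_false_iff_not]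
          intro h; exact hg h.1
        rw [List.filter_cons_of_neg (by simp [hpj])]

theorem pvBuckets_eq (d1 half : Int) (p : List (Int × Int × Int)) :
    pvScatter d1 half p ((PySem.List.pyRange 0 half 1).map (fun _ => ([] : List Int)))
      = (List.range half.toNat).map
          (fun k => (p.filter (pvPred d1 half k)).map (fun e => e.2.2)) := by
  have hlen0 : ((PySem.List.pyRange 0 half 1).map (fun _ => ([] : List Int))).length
      = half.toNat := by
    simp [PySem.List.length_pyRange_one]
  apply List.ext_getElem
  · rw [pvScatter_length]; simp
  · intro j h1 h2
    have hj : j < half.toNat := by simpa using h2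
    rw [← List.getD_eq_getElem _ ([] : List Int) h1]
    rw [pvScatter_getD d1 half p _ j (by rw [hlen0]; exact hj)]
    simp

-- A's pair-merge phase as an explicit flatMap over the pair indices
theorem pvPhaseA_eq (d1 half : Int) (p : List (Int × Int × Int)) :
    ((PySem.List.pyRange 0 half 1).foldl (fun acc i =>
      (PySem.List.pyRange 0 (p.length : Int) 1).foldl (fun acc j =>
        let e := PySem.List.pyGetD p j (0, 0, 0)
        if e.2.1 == i then acc ++ [e.2.2]
        else if e.2.1 == d1 - i - 1 then acc ++ [e.2.2]
        else acc) acc) [])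
    = (List.range half.toNat).flatMap (fun k : Nat =>
        (p.filter (fun e => e.2.1 == ((0 : Int) + (k : Int))
          || e.2.1 == d1 - ((0 : Int) + (k : Int)) - 1)).map
          (fun e => e.2.2)) := by
  have hinner : ∀ (acc : List Int) (i : Int),
      (PySem.List.pyRange 0 (p.length : Int) 1).foldl (fun acc j =>
        let e := PySem.List.pyGetD p j (0, 0, 0)
        if e.2.1 == i then acc ++ [e.2.2]
        else if e.2.1 == d1 - i - 1 then acc ++ [e.2.2]
        else acc) acc
      = acc ++ (p.filter (fun e => e.2.1 == i || e.2.1 == d1 - i - 1)).map (fun e => e.2.2) := by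
    intro acc i
    rw [PySem.List.foldl_pyRange_zero_pyGetD' p (0, 0, 0)
        (fun acc e => if e.2.1 == i then acc ++ [e.2.2]
          else if e.2.1 == d1 - i - 1 then acc ++ [e.2.2] else acc) acc]
    rw [PySem.List.foldl_congr_mem p _
        (fun acc e => if (e.2.1 == i || e.2.1 == d1 - i - 1) then acc ++ [e.2.2] else acc) acc
        (by intro acc e _
            by_cases hc1 : e.2.1 == i <;> by_cases hc2 : e.2.1 == d1 - i - 1 <;>
              simp [hc1, hc2])]
    exact PySem.List.foldl_append_if _ _ p acc
  rw [PySem.List.foldl_congr_mem _ _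
      (fun acc i => acc ++ (p.filter (fun e => e.2.1 == i || e.2.1 == d1 - i - 1)).map
        (fun e => e.2.2)) []
      (by intro acc i _; exact hinner acc i)]
  rw [PySem.List.foldl_append_eq_flatMap, PySem.List.pyRange_one 0 half]
  simp only [Int.sub_zero, List.nil_append]
  rw [List.flatMap_map]

-- the two selection predicates agree for every entry (given half = d1 >> 1 and k < half)
theorem pvPred_eq (d1 half : Int) (h1 : 2 * half ≤ d1) (h2 : d1 ≤ 2 * half + 1)
    (k : Nat) (hk : k < half.toNat) (e : Int × Int × Int) :
    (e.2.1 == ((0 : Int) + k) || e.2.1 == d1 - ((0 : Int) + k) - 1) = pvPred d1 half k e := by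
  rw [Bool.eq_iff_iff]
  simp only [Bool.or_eq_true, beq_iff_eq, pvPred, pvPid, decide_eq_true_eq]
  omega

theorem pvShift_bounds (d1 : Int) :
    2 * (d1 >>> (1 : Nat)) ≤ d1 ∧ d1 ≤ 2 * (d1 >>> (1 : Nat)) + 1 := by
  have h := Int.shiftRight_eq_div_pow d1 1
  simp at h
  omega

-- the sorted entry list B merges (its build phase, sorted)
def pvP (dim : Int) : List (Int × Int × Int) :=
  PySem.List.sorted
    ((PySem.List.pyRange 0 dim 1).flatMap (fun y =>
      (PySem.List.pyRange 0 y 1).map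
        (fun x => (y, x, PySem.Int.floordiv (y * (y - 1)) 2 + x))))
    (fun s => (s.2.1 <<< (16 : Nat)) + s.1) false

-- the sorted entry list A merges (its build phase, sorted)
def pvPA (dim : Int) : List (Int × Int × Int) :=
  PySem.List.sorted
    ((PySem.List.pyRange 0 dim 1).foldl
      (fun s y => (PySem.List.pyRange 0 y 1).foldl
        (fun t x => (t.1 + 1, t.2 ++ [(y, x, t.1)])) s)
      ((0 : Int), ([] : List (Int × Int × Int)))).2
    (fun s => (s.2.1 <<< (16 : Nat)) + s.1) false

theorem pvP_eq (dim : Int) : pvPA dim = pvP dim := by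
  unfold pvPA pvP; rw [pvTri_eq dim]

theorem pvAEq (dim : Int) :
    idx_remap dim
      = (PySem.List.pyRange 0 ((dim - 1) >>> (1 : Nat)) 1).foldl (fun acc i =>
          (PySem.List.pyRange 0 ((pvPA dim).length : Int) 1).foldl (fun acc j =>
            let e := PySem.List.pyGetD (pvPA dim) j (0, 0, 0)
            if e.2.1 == i then acc ++ [e.2.2]
            else if e.2.1 == (dim - 1) - i - 1 then acc ++ [e.2.2]
            else acc) acc) [] := rfl

theorem pvAltEq (dim : Int) :
    idx_remap_alt dim
      = (pvScatter (dim - 1) ((dim - 1) >>> (1 : Nat)) (pvP dim)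
          ((PySem.List.pyRange 0 ((dim - 1) >>> (1 : Nat)) 1).map
            (fun _ => ([] : List Int)))).foldl (fun acc b => acc ++ b) [] := rfl

-- ===== VERDICT (by name: the statement is the Claim_ definition above) =====
theorem idx_remap_spec : Claim_equal_idx_remap := by
  intro dim _
  show idx_remap dim = idx_remap_alt dim
  obtain ⟨h1, h2⟩ := pvShift_bounds (dim - 1)
  rw [pvAEq dim, pvP_eq dim, pvAltEq dim, pvPhaseA_eq, PySem.List.foldl_append_eq_flatten,
      pvBuckets_eq]
  rw [← List.flatMap_def]
  simp only [List.nil_append]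
  refine List.flatMap_congr ?_
  intro k hk
  rw [List.filter_congr
      (fun e _ => pvPred_eq (dim - 1) _ h1 h2 k (List.mem_range.mp hk) e)]
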